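-- pv_equiv track=rewrite | github.com/DrDroidLab/drdroid-debug-toolkit | drdroid_debug_toolkit/core/integrations/source_managers/coralogix_source_manager.py | _needs_quoting_for_promql
-- ===== SOURCE A (Python) =====
-- def _needs_quoting_for_promql(value: str) -> bool:
--     """
--     Check if a value needs to be quoted in PromQL due to special characters.
--     """
--     if not value:
--         return False
--
--     # Characters that require quoting in PromQL label values
--     special_chars = ['/', '\\', ':', ';', '=', '!', '~', '^', '$', '*', '+', '?', '(', ')', '[', ']', '{', '}', '|', '&', ' ', '\t', '\n']
--
--     # Check if the value contains any special characters
--     for char in special_chars: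
--         if char in value:
--             return True
--
--     # Also quote if the value starts with a number (to avoid confusion with numeric values)
--     if value[0].isdigit():
--         return True
--
--     return False
-- ===== SOURCE B (Python) =====
-- _PROMQL_SPECIAL = frozenset('/\\:;=!~^$*+?()[]{}|& \t\n')
--
--
-- def _needs_quoting_for_promql(value: str) -> bool:
--     """
--     Check if a value needs to be quoted in PromQL due to special characters.
--     """
--     if not value:
--         return False
--     # One pass over the input's characters against a constant character set,
--     # plus the leading-digit rule.
--     return value[0].isdigit() or any(c in _PROMQL_SPECIAL for c in value)
-- ===== Notes on version B (the rewrite author's own statement) =====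
-- stated objective: idiomatic
-- what changed: Instead of looping over the 23 special substrings and scanning the whole input for each (substring search per special char), B makes a single pass over the input's characters testing each against a constant frozenset, combined with the leading-digit check in one boolean expression.
import Mathlib
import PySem

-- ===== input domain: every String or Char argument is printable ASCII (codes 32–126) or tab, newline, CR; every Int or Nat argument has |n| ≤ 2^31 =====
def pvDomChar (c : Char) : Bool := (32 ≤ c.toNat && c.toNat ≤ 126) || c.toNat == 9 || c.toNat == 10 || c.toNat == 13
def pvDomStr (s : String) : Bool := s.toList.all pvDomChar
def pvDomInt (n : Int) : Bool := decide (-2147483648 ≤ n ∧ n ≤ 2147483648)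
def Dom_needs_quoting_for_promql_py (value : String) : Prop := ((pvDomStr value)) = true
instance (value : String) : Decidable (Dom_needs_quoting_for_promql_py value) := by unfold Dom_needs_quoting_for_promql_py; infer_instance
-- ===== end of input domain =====

-- B: one pass over the input's characters against a constant character set, instead of A's scan of the whole input once per special substring; idiomatic, same cost class.

-- ===== PORT A =====
-- the Python list special_chars (each a 1-char str)
def pvSpecialStrs : List String :=
  ["/", "\\", ":", ";", "=", "!", "~", "^", "$", "*", "+", "?", "(", ")", "[", "]", "{", "}", "|", "&", " ", "\t", "\n"]

def needs_quoting_for_promql_py (value : String) : Bool :=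
  if value.toList = [] then false            -- if not value: return False
  else if pvSpecialStrs.any (fun ch => PySem.Str.isIn ch value) then true   -- for char in special_chars: if char in value: return True
  else match PySem.Str.pyGet? value 0 with   -- if value[0].isdigit(): return True
       | some c => PySem.Chars.isdigit c
       | none => false

-- ===== PORT B =====
-- _PROMQL_SPECIAL = frozenset('/\:;=!~^$*+?()[]{}|& \t\n')  (the characters of the literal)
def pvSpecialChars : List Char :=
  ['/', '\\', ':', ';', '=', '!', '~', '^', '$', '*', '+', '?', '(', ')', '[', ']', '{', '}', '|', '&', ' ', '\t', '\n']

def pvSpecialSet : PySem.Set Char := PySem.Set.ofList pvSpecialChars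

def needs_quoting_for_promql_py_alt (value : String) : Bool :=
  match value.toList with
  | [] => false                              -- if not value: return False
  | c :: cs =>                               -- value[0].isdigit() or any(c in _PROMQL_SPECIAL for c in value)
      PySem.Chars.isdigit c || (c :: cs).any (fun ch => PySem.Set.contains pvSpecialSet ch)

-- ===== PRECONDITION & SPEC =====
def Spec_needs_quoting_for_promql_py (value : String) (out : Bool) : Prop := out = needs_quoting_for_promql_py_alt value
instance (value : String) (out : Bool) : Decidable (Spec_needs_quoting_for_promql_py value out) := by unfold Spec_needs_quoting_for_promql_py; infer_instance

-- ===== CLAIM (what is proved, stated in full; the proofs are below) =====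
def Claim_equal_needs_quoting_for_promql_py : Prop := ∀ (value : String), Dom_needs_quoting_for_promql_py value → Spec_needs_quoting_for_promql_py value (needs_quoting_for_promql_py value)

-- ===== LEMMAS AND PROOFS =====

-- a singleton infix is just membership
lemma singleton_infix_iff {c : Char} {l : List Char} : [c] <:+: l ↔ c ∈ l := by
  constructor
  · intro h; exact h.subset (List.mem_singleton_self c)
  · intro h
    obtain ⟨p, q, rfl⟩ := List.append_of_mem h
    exact ⟨p, q, by simp⟩

-- swapping which list is traversed and which is looked up in an `any`
lemma any_contains_comm {α : Type} [BEq α] [LawfulBEq α] (l m : List α) :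
    (l.any fun a => m.contains a) = (m.any fun a => l.contains a) := by
  apply Bool.eq_iff_iff.mpr
  simp only [List.any_eq_true, List.contains_iff_mem]
  exact ⟨fun ⟨a, h1, h2⟩ => ⟨a, h2, h1⟩, fun ⟨a, h1, h2⟩ => ⟨a, h2, h1⟩⟩

-- A's per-special-substring scan finds a hit iff some input character is special
lemma any_isIn_eq (value : String) :
    pvSpecialStrs.any (fun ch => PySem.Str.isIn ch value)
      = value.toList.any (fun ch => PySem.Set.contains pvSpecialSet ch) := by
  have hstrs : pvSpecialStrs = pvSpecialChars.map (fun c => String.ofList [c]) := by decide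
  rw [hstrs, List.any_map]
  have h1 : ((fun ch => PySem.Str.isIn ch value) ∘ fun c => String.ofList [c])
      = fun c => value.toList.contains c := by
    funext c
    apply Bool.eq_iff_iff.mpr
    simp only [Function.comp, PySem.Str.isIn_iff_infix, List.contains_iff_mem,
      String.toList_ofList]
    exact singleton_infix_iff
  have h2 : (fun ch => PySem.Set.contains pvSpecialSet ch)
      = fun ch => pvSpecialChars.contains ch := by
    funext ch
    apply Bool.eq_iff_iff.mpr
    simp [pvSpecialSet, PySem.Set.mem_ofList]
  rw [h1, h2, any_contains_comm]

-- ===== VERDICT (by name: the statement is the Claim_ definition above) =====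
theorem needs_quoting_for_promql_py_spec : Claim_equal_needs_quoting_for_promql_py := by
  intro value _
  unfold Spec_needs_quoting_for_promql_py needs_quoting_for_promql_py needs_quoting_for_promql_py_alt
  rw [any_isIn_eq]
  cases h : value.toList with
  | nil => simp
  | cons c cs =>
    have hget : PySem.Str.pyGet? value 0 = some c := by simp [h]
    rw [hget]
    cases hd : PySem.Chars.isdigit c <;>
      cases hany : (c :: cs).any (fun ch => PySem.Set.contains pvSpecialSet ch) <;>
        simp_all
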